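-- pv_equiv track=rewrite | github.com/blendnet-ai/skylearn-django-lms | practice/providers/providers.py | generate_fillerwords_summary
-- ===== SOURCE A (Python) =====
-- def generate_fillerwords_summary(fillerword_percentage):
--     score_details = {
--         "segments": [
--             {
--                 "description": "Good",
--                 "fillerword_score_range": [0, 5],
--                 "details": "Great job! Your use of filler words was minimal, allowing your message to come across clearly."
--             },
--             {
--                 "description": "Average",
--                 "fillerword_score_range": [5, 15],
--                 "details": "Your speech was decent, but there were moments when filler words were distracting. Practice speaking more confidently and with fewer hesitations."
--             },
--             {
--                 "description": "Bad",
--                 "fillerword_score_range": [15, 100],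
--                 "details": "You used too many filler words, disrupting the overall flow of your speech. Practice speaking slowly and thinking ahead to reduce the use of filler words."
--             },
--         ]
--     }
--
--     segments = score_details["segments"]
--
--     for segment in segments:
--         score_range = segment["fillerword_score_range"]
--         if score_range[0] <= fillerword_percentage < score_range[1]:
--             return segment["description"], segment["details"]
--
--     return "Unknown", "Fillerword score outside the specified range."
-- ===== SOURCE B (Python) =====
-- _BOUNDS = (0, 5, 15, 100)
-- _BANDS = (
--     ("Good", "Great job! Your use of filler words was minimal, allowing your message to come across clearly."),
--     ("Average", "Your speech was decent, but there were moments when filler words were distracting. Practice speaking more confidently and with fewer hesitations."),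
--     ("Bad", "You used too many filler words, disrupting the overall flow of your speech. Practice speaking slowly and thinking ahead to reduce the use of filler words."),
-- )
--
-- def generate_fillerwords_summary(fillerword_percentage):
--     # Binary search in the sorted boundary list for the band containing the score.
--     if not (0 <= fillerword_percentage < 100):
--         return "Unknown", "Fillerword score outside the specified range."
--     lo, hi = 0, len(_BOUNDS) - 1
--     while lo + 1 < hi:
--         mid = (lo + hi) // 2
--         if _BOUNDS[mid] <= fillerword_percentage:
--             lo = mid
--         else:
--             hi = mid
--     return _BANDS[lo]
-- ===== Notes on version B (the rewrite author's own statement) =====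
-- stated objective: alternative
-- what changed: Replaced the linear scan over a table of (low,high) range records with a range check plus a binary search over the sorted boundary list [0,5,15,100], indexing into a band table.
import Mathlib
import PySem

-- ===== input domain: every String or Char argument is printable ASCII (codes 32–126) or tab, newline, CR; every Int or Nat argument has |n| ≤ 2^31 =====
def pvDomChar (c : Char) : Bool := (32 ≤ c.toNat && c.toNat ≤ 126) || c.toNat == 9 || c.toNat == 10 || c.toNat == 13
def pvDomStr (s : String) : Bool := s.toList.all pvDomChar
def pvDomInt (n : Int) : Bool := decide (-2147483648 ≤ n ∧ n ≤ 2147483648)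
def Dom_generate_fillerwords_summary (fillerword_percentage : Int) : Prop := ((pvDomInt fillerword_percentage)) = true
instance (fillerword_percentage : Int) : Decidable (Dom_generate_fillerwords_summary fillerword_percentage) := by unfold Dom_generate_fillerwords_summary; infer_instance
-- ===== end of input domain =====

-- B replaces A's linear scan over (low,high) range records with a binary search over the sorted boundary list (objective: alternative algorithm).


-- ===== PORT A =====
-- A: the segments table (list of dicts) as a list of records, scanned in order with early return.
def pvSegments_A : List (String × (Int × Int) × String) :=
  [ ("Good", (0, 5), "Great job! Your use of filler words was minimal, allowing your message to come across clearly."),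
    ("Average", (5, 15), "Your speech was decent, but there were moments when filler words were distracting. Practice speaking more confidently and with fewer hesitations."),
    ("Bad", (15, 100), "You used too many filler words, disrupting the overall flow of your speech. Practice speaking slowly and thinking ahead to reduce the use of filler words.") ]

def pvScan_A (fillerword_percentage : Int) : List (String × (Int × Int) × String) → String × String
  | [] => ("Unknown", "Fillerword score outside the specified range.")
  | (desc, (lo, hi), details) :: rest =>
    if lo ≤ fillerword_percentage ∧ fillerword_percentage < hi then (desc, details)
    else pvScan_A fillerword_percentage rest

def generate_fillerwords_summary (fillerword_percentage : Int) : String × String :=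
  pvScan_A fillerword_percentage pvSegments_A

-- ===== PORT B =====
-- B: sorted boundary list + band table, located by binary search (Source B's while loop).
def pvBounds_B : List Int := [0, 5, 15, 100]

def pvBands_B : List (String × String) :=
  [ ("Good", "Great job! Your use of filler words was minimal, allowing your message to come across clearly."),
    ("Average", "Your speech was decent, but there were moments when filler words were distracting. Practice speaking more confidently and with fewer hesitations."),
    ("Bad", "You used too many filler words, disrupting the overall flow of your speech. Practice speaking slowly and thinking ahead to reduce the use of filler words.") ]

-- the `while lo + 1 < hi` binary-search loop of Source B
def pvBisect_B (fillerword_percentage : Int) (lo hi : Nat) : Nat :=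
  if _h : lo + 1 < hi then
    let mid := (lo + hi) / 2
    if pvBounds_B.getD mid 0 ≤ fillerword_percentage then pvBisect_B fillerword_percentage mid hi
    else pvBisect_B fillerword_percentage lo mid
  else lo
termination_by hi - lo
decreasing_by all_goals omega

def generate_fillerwords_summary_alt (fillerword_percentage : Int) : String × String :=
  if 0 ≤ fillerword_percentage ∧ fillerword_percentage < 100 then
    pvBands_B.getD (pvBisect_B fillerword_percentage 0 (pvBounds_B.length - 1))
      ("Unknown", "Fillerword score outside the specified range.")
  else ("Unknown", "Fillerword score outside the specified range.")

-- ===== PRECONDITION & SPEC =====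
def Spec_generate_fillerwords_summary (fillerword_percentage : Int) (out : String × String) : Prop := out = generate_fillerwords_summary_alt fillerword_percentage
instance (fillerword_percentage : Int) (out : String × String) : Decidable (Spec_generate_fillerwords_summary fillerword_percentage out) := by unfold Spec_generate_fillerwords_summary; infer_instance

-- ===== CLAIM (what is proved, stated in full; the proofs are below) =====
def Claim_equal_generate_fillerwords_summary : Prop := ∀ (fillerword_percentage : Int), Dom_generate_fillerwords_summary fillerword_percentage → Spec_generate_fillerwords_summary fillerword_percentage (generate_fillerwords_summary fillerword_percentage)

-- ===== LEMMAS AND PROOFS =====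
-- Fully unfold the binary search on the concrete 4-element boundary list.
theorem pvBisect_B_stop (p : Int) (lo : Nat) : pvBisect_B p lo (lo + 1) = lo := by
  rw [pvBisect_B]; simp

theorem pvBisect_B_13 (p : Int) : pvBisect_B p 1 3 = if 15 ≤ p then 2 else 1 := by
  rw [pvBisect_B]
  have h2 : pvBisect_B p 2 3 = 2 := pvBisect_B_stop p 2
  have h1 : pvBisect_B p 1 2 = 1 := pvBisect_B_stop p 1
  simp [pvBounds_B, h1, h2]

theorem pvBisect_B_eval (p : Int) :
    pvBisect_B p 0 3 = if 5 ≤ p then (if 15 ≤ p then 2 else 1) else 0 := by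
  rw [pvBisect_B]
  have h0 : pvBisect_B p 0 1 = 0 := pvBisect_B_stop p 0
  simp [pvBounds_B, h0, pvBisect_B_13]

-- ===== VERDICT (by name: the statement is the Claim_ definition above) =====
theorem generate_fillerwords_summary_spec : Claim_equal_generate_fillerwords_summary := by
  intro p _
  unfold Spec_generate_fillerwords_summary
  unfold generate_fillerwords_summary generate_fillerwords_summary_alt
  simp only [pvSegments_A, pvScan_A, pvBounds_B, List.length]
  rw [show (4 - 1 : Nat) = 3 from rfl, pvBisect_B_eval]
  simp only [pvBands_B]
  split_ifs <;> first | rfl | omega
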